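-- pv_equiv track=rewrite | github.com/syntaxtic/my-interviews | google-foobar/2020/level-3b.py | solution
-- ===== SOURCE A (Python) =====
-- def solution(l):
--     allMultiples = {}
--
--     # Store the multiples of each
--     for i in range(len(l)):
--         multiples = []
--         for j in range(i+1, len(l)):
--             if l[j] % l[i] == 0:
--                 multiples.append(j)
--         if multiples:
--             allMultiples[i] = multiples
--
--     count = 0
--     # if a multiple has its own multiple, increase the count
--     for v in allMultiples.values():
--         for multiple in v:
--             if multiple in allMultiples:
--                 count += len(allMultiples[multiple])
--
--     return count
-- ===== SOURCE B (Python) =====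
-- def solution(l):
--     n = len(l)
--     total = 0
--     for j in range(n):
--         before = 0
--         for i in range(j):
--             if l[j] % l[i] == 0:
--                 before += 1
--         after = 0
--         for k in range(j + 1, n):
--             if l[k] % l[j] == 0:
--                 after += 1
--         total += before * after
--     return total
-- ===== Notes on version B (the rewrite author's own statement) =====
-- stated objective: simpler
-- what changed: A builds a dict mapping each index to the list of its later multiples and then follows two-step chains through the dict; B counts, for each middle index j, the divisors before j and the multiples after j and sums before*after, with no dict at all.
import Mathlib
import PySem

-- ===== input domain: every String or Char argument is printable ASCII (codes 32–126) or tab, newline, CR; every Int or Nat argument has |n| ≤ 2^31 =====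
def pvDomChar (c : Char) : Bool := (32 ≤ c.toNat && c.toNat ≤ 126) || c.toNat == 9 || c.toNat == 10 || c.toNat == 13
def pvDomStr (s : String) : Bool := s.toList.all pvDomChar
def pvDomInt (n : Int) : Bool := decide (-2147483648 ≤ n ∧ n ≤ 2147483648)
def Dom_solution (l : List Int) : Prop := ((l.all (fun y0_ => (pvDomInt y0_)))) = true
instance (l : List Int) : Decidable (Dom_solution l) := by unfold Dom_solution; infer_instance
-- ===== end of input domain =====

-- B counts divisors before / multiples after each middle index and sums the products,
-- replacing A's dict-of-multiples plus chain-following; same O(n^2) cost, no dict.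

-- ===== PORT A =====
-- inner loop of A's first pass: the list of indices j > i with l[j] % l[i] == 0
def multiplesOf (l : List Int) (i : Int) : List Int :=
  (PySem.List.pyRange (i + 1) (l.length : Int) 1).foldl
    (fun m j => if PySem.Int.mod (PySem.List.pyGetD l j 0) (PySem.List.pyGetD l i 0) = 0
                then m ++ [j] else m) []

-- A's first pass: the dict allMultiples
def buildDict (l : List Int) : PySem.Dict Int (List Int) :=
  (PySem.List.pyRange 0 (l.length : Int) 1).foldl
    (fun d i =>
      let multiples := multiplesOf l i
      if multiples ≠ [] then d.insert i multiples else d)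
    PySem.Dict.empty

def solution (l : List Int) : Int :=
  let allMultiples := buildDict l
  allMultiples.values.foldl
    (fun c v => v.foldl
      (fun c m => if allMultiples.contains m
                  then c + ((allMultiples.getD m []).length : Int) else c) c) 0

-- ===== PORT B =====
def solution_alt (l : List Int) : Int :=
  (PySem.List.pyRange 0 (l.length : Int) 1).foldl
    (fun total j =>
      let before := (PySem.List.pyRange 0 j 1).foldl
        (fun b i => if PySem.Int.mod (PySem.List.pyGetD l j 0) (PySem.List.pyGetD l i 0) = 0
                    then b + 1 else b) 0
      let after := (PySem.List.pyRange (j + 1) (l.length : Int) 1).foldl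
        (fun a k => if PySem.Int.mod (PySem.List.pyGetD l k 0) (PySem.List.pyGetD l j 0) = 0
                    then a + 1 else a) 0
      total + before * after) 0

-- ===== PRECONDITION & SPEC =====
-- Pre_ excludes lists with a 0 anywhere before the last element: there Python A (and B)
-- raises ZeroDivisionError on l[j] % 0.
def Pre_solution (l : List Int) : Prop := (0 : Int) ∉ l.dropLast
instance (l : List Int) : Decidable (Pre_solution l) := by unfold Pre_solution; infer_instance

def pvWitness_solution : List Int := [2, 4, 8, 3]

def Spec_solution (l : List Int) (out : Int) : Prop := out = solution_alt l
instance (l : List Int) (out : Int) : Decidable (Spec_solution l out) := by unfold Spec_solution; infer_instance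

-- ===== CLAIM (what is proved, stated in full; the proofs are below) =====
def Claim_equal_solution : Prop := ∀ (l : List Int), Dom_solution l → Pre_solution l → Spec_solution l (solution l)

-- ===== LEMMAS AND PROOFS =====

-- the divisibility test both programs apply: does l[i] divide l[m]?
def divOK (l : List Int) (i m : Int) : Bool :=
  decide (PySem.Int.mod (PySem.List.pyGetD l m 0) (PySem.List.pyGetD l i 0) = 0)

-- the length of multiplesOf, as an Int
def glen (l : List Int) (m : Int) : Int := ((multiplesOf l m).length : Int)

lemma multiplesOf_eq_filter (l : List Int) (i : Int) :
    multiplesOf l i = (PySem.List.pyRange (i + 1) (l.length : Int) 1).filter (divOK l i) := by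
  unfold multiplesOf
  rw [show (fun (m : List Int) (j : Int) =>
        if PySem.Int.mod (PySem.List.pyGetD l j 0) (PySem.List.pyGetD l i 0) = 0
        then m ++ [j] else m)
      = (fun m j => if divOK l i j then m ++ [id j] else m) by
        funext m j; simp [divOK]]
  rw [PySem.List.foldl_append_if (divOK l i) id]
  simp

lemma mem_multiplesOf {l : List Int} {i m : Int} (hi : 0 ≤ i) (h : m ∈ multiplesOf l i) :
    0 ≤ m ∧ m < (l.length : Int) := by
  rw [multiplesOf_eq_filter] at h
  have hm := PySem.List.mem_pyRange_one.mp (List.mem_of_mem_filter h)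
  omega

-- a foldl that conditionally adds, as a sum
lemma foldl_if_add {α : Type} (p : α → Bool) (g : α → Int) (xs : List α) (c : Int) :
    xs.foldl (fun c x => if p x then c + g x else c) c
      = c + (xs.map (fun x => if p x then g x else 0)).sum := by
  induction xs generalizing c with
  | nil => simp
  | cons x t ih => by_cases h : p x <;> simp [h, ih, add_assoc]

-- the dict built by A's first loop, over any distinct list of fresh keys
lemma build_items (l : List Int) (ks : List Int) (d : PySem.Dict Int (List Int))
    (hnd : ks.Nodup) (hfresh : ∀ k ∈ ks, d.contains k = false) :
    (ks.foldl (fun d i =>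
        let multiples := multiplesOf l i
        if multiples ≠ [] then d.insert i multiples else d) d).items
      = d.items ++ (ks.filter (fun i => multiplesOf l i ≠ [])).map (fun i => (i, multiplesOf l i)) := by
  induction ks generalizing d with
  | nil => simp
  | cons k t ih =>
    have hk : d.contains k = false := hfresh k (by simp)
    have hnd' : t.Nodup := hnd.of_cons
    rw [List.foldl_cons]
    by_cases hm : multiplesOf l k = []
    · rw [show (let multiples := multiplesOf l k;
          if multiples ≠ [] then d.insert k multiples else d) = d by simp [hm]]
      rw [ih d hnd' (fun x hx => hfresh x (List.mem_cons_of_mem _ hx))]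
      simp [hm]
    · rw [show (let multiples := multiplesOf l k;
          if multiples ≠ [] then d.insert k multiples else d)
          = d.insert k (multiplesOf l k) by simp [hm]]
      have hfresh' : ∀ x ∈ t, (d.insert k (multiplesOf l k)).contains x = false := by
        intro x hx
        have hxk : x ≠ k := fun h => (List.nodup_cons.mp hnd).1 (h ▸ hx)
        rw [PySem.Dict.contains_insert]
        simp [hxk, hfresh x (List.mem_cons_of_mem _ hx)]
      rw [ih _ hnd' hfresh', PySem.Dict.items_insert_of_not_contains _ _ hk]
      simp [hm]

lemma buildDict_items (l : List Int) :
    (buildDict l).items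
      = ((PySem.List.pyRange 0 (l.length : Int) 1).filter (fun i => multiplesOf l i ≠ [])).map
          (fun i => (i, multiplesOf l i)) := by
  unfold buildDict
  rw [build_items l _ PySem.Dict.empty (PySem.List.nodup_pyRange_one 0 _)
      (fun k _ => PySem.Dict.contains_empty k)]
  simp [PySem.Dict.empty]

lemma buildDict_keys (l : List Int) :
    (buildDict l).keys
      = (PySem.List.pyRange 0 (l.length : Int) 1).filter (fun i => multiplesOf l i ≠ []) := by
  simp only [PySem.Dict.keys, buildDict_items, List.map_map]
  simp [Function.comp_def]

lemma buildDict_keys_nodup (l : List Int) : (buildDict l).keys.Nodup := by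
  rw [buildDict_keys]
  exact (PySem.List.nodup_pyRange_one 0 _).filter _

-- lookups in buildDict, for m in index range: the if-term of A's second loop is glen m
lemma lookup_term (l : List Int) (m : Int) (h0 : 0 ≤ m) (h1 : m < (l.length : Int)) :
    (if (buildDict l).contains m
     then (((buildDict l).getD m []).length : Int) else 0) = glen l m := by
  have hmem : m ∈ PySem.List.pyRange 0 (l.length : Int) 1 := PySem.List.mem_pyRange_one.mpr ⟨h0, h1⟩
  by_cases hm : multiplesOf l m = []
  · have hc : (buildDict l).contains m = false := by
      rw [PySem.Dict.contains_eq_decide_mem_keys, buildDict_keys]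
      simp [hm]
    simp [hc, glen, hm]
  · have hit : (m, multiplesOf l m) ∈ (buildDict l).items := by
      rw [buildDict_items]
      exact List.mem_map.mpr ⟨m, List.mem_filter.mpr ⟨hmem, by simpa using hm⟩, rfl⟩
    have hc : (buildDict l).contains m = true := by
      rw [PySem.Dict.contains_eq_decide_mem_keys, buildDict_keys]
      simp [hm, hmem]
    rw [hc, if_pos rfl, PySem.Dict.getD_of_mem_items _ hit (buildDict_keys_nodup l)]
    rfl

-- sum over a filtered list where the summand vanishes off the filter
lemma sum_filter_eq_sum {α : Type} (p : α → Bool) (g : α → Int) (xs : List α)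
    (h : ∀ x ∈ xs, p x = false → g x = 0) :
    ((xs.filter p).map g).sum = (xs.map g).sum := by
  induction xs with
  | nil => simp
  | cons x t ih =>
    have ih' := ih (fun y hy => h y (List.mem_cons_of_mem _ hy))
    by_cases hp : p x
    · simp [hp, ih']
    · simp [hp, ih', h x (by simp) (by simpa using hp)]

-- sum over a filtered list, as a sum of if-terms over the whole list
lemma sum_map_filter {α : Type} (p : α → Bool) (g : α → Int) (xs : List α) :
    ((xs.filter p).map g).sum = (xs.map (fun x => if p x then g x else 0)).sum := by
  induction xs with
  | nil => simp
  | cons x t ih => by_cases hp : p x <;> simp [hp, ih]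

-- multiplying a 0/1 indicator sum by a constant
lemma sum_map_ite_const (p : Int → Bool) (c : Int) (xs : List Int) :
    (xs.map (fun i => if p i then c else 0)).sum = (List.countP p xs : Int) * c := by
  induction xs with
  | nil => simp
  | cons x t ih =>
    by_cases hp : p x <;> simp [hp, ih, add_mul, add_comm]

lemma count_mul (p : Int → Bool) (c : Int) (xs : List Int) :
    (xs.foldl (fun b i => if p i then b + 1 else b) 0) * c
      = (xs.map (fun i => if p i then c else 0)).sum := by
  rw [PySem.List.foldl_count_if p xs 0, sum_map_ite_const]
  simp

-- the triangular double-sum swap, over pyRange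
lemma swap_sum (F : Int → Int → Int) (n : Nat) :
    ((PySem.List.pyRange 0 (n : Int) 1).map
        (fun i => ((PySem.List.pyRange (i + 1) (n : Int) 1).map (fun m => F i m)).sum)).sum
      = ((PySem.List.pyRange 0 (n : Int) 1).map
        (fun m => ((PySem.List.pyRange 0 m 1).map (fun i => F i m)).sum)).sum := by
  induction n with
  | zero => simp [PySem.List.pyRange_one_eq_nil]
  | succ n ih =>
    have hn0 : (0 : Int) ≤ (n : Int) := by exact_mod_cast Nat.zero_le n
    have hcast : ((n + 1 : Nat) : Int) = (n : Int) + 1 := by push_cast; ring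
    rw [hcast, PySem.List.pyRange_one_succ_right hn0]
    simp only [List.map_append, List.sum_append, List.map_cons, List.map_nil,
      List.sum_cons, List.sum_nil]
    rw [PySem.List.pyRange_one_eq_nil (le_refl ((n : Int) + 1))]
    have hmapL : (PySem.List.pyRange 0 (n : Int) 1).map
          (fun i => ((PySem.List.pyRange (i + 1) ((n : Int) + 1) 1).map (fun m => F i m)).sum)
        = (PySem.List.pyRange 0 (n : Int) 1).map
          (fun i => ((PySem.List.pyRange (i + 1) (n : Int) 1).map (fun m => F i m)).sum + F i n) := by
      apply List.map_congr_left
      intro i hi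
      have hib := PySem.List.mem_pyRange_one.mp hi
      rw [PySem.List.pyRange_one_succ_right (by omega : i + 1 ≤ (n : Int))]
      simp
    rw [hmapL, PySem.List.sum_map_add_int, ih]
    simp

-- B as a double sum
lemma solution_alt_sum (l : List Int) :
    solution_alt l
      = ((PySem.List.pyRange 0 (l.length : Int) 1).map
          (fun m => ((PySem.List.pyRange 0 m 1).map
            (fun i => if divOK l i m then glen l m else 0)).sum)).sum := by
  unfold solution_alt
  rw [show (fun (total j : Int) =>
        let before := (PySem.List.pyRange 0 j 1).foldl
          (fun b i => if PySem.Int.mod (PySem.List.pyGetD l j 0) (PySem.List.pyGetD l i 0) = 0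
                      then b + 1 else b) 0
        let after := (PySem.List.pyRange (j + 1) (l.length : Int) 1).foldl
          (fun a k => if PySem.Int.mod (PySem.List.pyGetD l k 0) (PySem.List.pyGetD l j 0) = 0
                      then a + 1 else a) 0
        total + before * after)
      = (fun total j => total +
          ((PySem.List.pyRange 0 j 1).map
            (fun i => if divOK l i j then glen l j else 0)).sum) by
      funext total j
      show total + _ * _ = _
      congr 1
      have hafter : (PySem.List.pyRange (j + 1) (l.length : Int) 1).foldl
          (fun a k => if PySem.Int.mod (PySem.List.pyGetD l k 0) (PySem.List.pyGetD l j 0) = 0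
                      then a + 1 else a) 0 = glen l j := by
        rw [show (fun (a k : Int) =>
              if PySem.Int.mod (PySem.List.pyGetD l k 0) (PySem.List.pyGetD l j 0) = 0
              then a + 1 else a)
            = (fun a k => if divOK l j k then a + 1 else a) by
            funext a k; simp [divOK]]
        rw [PySem.List.foldl_count_if (divOK l j)]
        rw [glen, multiplesOf_eq_filter, List.countP_eq_length_filter]
        simp
      rw [hafter]
      rw [show (fun (b i : Int) =>
            if PySem.Int.mod (PySem.List.pyGetD l j 0) (PySem.List.pyGetD l i 0) = 0
            then b + 1 else b)
          = (fun b i => if divOK l i j then b + 1 else b) by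
          funext b i; simp [divOK]]
      exact count_mul (fun i => divOK l i j) (glen l j) _]
  rw [PySem.List.foldl_add]
  simp

-- A as the transposed double sum
lemma solution_sum (l : List Int) :
    solution l
      = ((PySem.List.pyRange 0 (l.length : Int) 1).map
          (fun i => ((PySem.List.pyRange (i + 1) (l.length : Int) 1).map
            (fun m => if divOK l i m then glen l m else 0)).sum)).sum := by
  unfold solution
  simp only []
  rw [show (fun (c : Int) (v : List Int) => v.foldl
        (fun c m => if (buildDict l).contains m
                    then c + (((buildDict l).getD m []).length : Int) else c) c)
      = (fun c v => c + (v.map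
          (fun m => if (buildDict l).contains m
                    then (((buildDict l).getD m []).length : Int) else 0)).sum) by
      funext c v
      exact foldl_if_add (fun m => (buildDict l).contains m)
        (fun m => (((buildDict l).getD m []).length : Int)) v c]
  rw [PySem.List.foldl_add]
  have hvals : (buildDict l).values
      = ((PySem.List.pyRange 0 (l.length : Int) 1).filter (fun i => multiplesOf l i ≠ [])).map
          (fun i => multiplesOf l i) := by
    simp only [PySem.Dict.values, buildDict_items, List.map_map]
    rfl
  rw [hvals, List.map_map, zero_add]
  trans (((PySem.List.pyRange 0 (l.length : Int) 1).filter (fun i => multiplesOf l i ≠ [])).map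
      (fun i => ((multiplesOf l i).map (fun m => glen l m)).sum)).sum
  · congr 1
    apply List.map_congr_left
    intro i hi
    have hiR : i ∈ PySem.List.pyRange 0 (l.length : Int) 1 := List.mem_of_mem_filter hi
    have hi0 : 0 ≤ i := (PySem.List.mem_pyRange_one.mp hiR).1
    simp only [Function.comp_def]
    congr 1
    apply List.map_congr_left
    intro m hm
    have hb := mem_multiplesOf hi0 hm
    exact lookup_term l m hb.1 hb.2
  · rw [sum_filter_eq_sum _ _ _ (by
      intro x _ hx
      have hxe : multiplesOf l x = [] := by simpa using hx
      simp [hxe])]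
    congr 1
    apply List.map_congr_left
    intro i _
    rw [multiplesOf_eq_filter l i, sum_map_filter]

-- ===== VERDICT (by name: the statement is the Claim_ definition above) =====
theorem solution_spec : Claim_equal_solution := by
  intro l _ _
  unfold Spec_solution
  rw [solution_sum, solution_alt_sum]
  exact swap_sum (fun i m => if divOK l i m then glen l m else 0) l.length
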